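-- pv_equiv track=rewrite | github.com/argilo/advent | 2023/05_fast.py | forward_with_room
-- ===== SOURCE A (Python) =====
-- def forward_with_room(n, map):
--     room = 1000000000000
--     for d_start, s_start, num in map:
--         if n < s_start:
--             room = min(room, s_start - n)
--         if s_start <= n < s_start + num:
--             return d_start + (n - s_start), (s_start + num) - n
--     if room == 1000000000000:
--         room = -1
--     return n, room
-- ===== SOURCE B (Python) =====
-- def forward_with_room(n, map):
--     for d_start, s_start, num in map:
--         if s_start <= n < s_start + num:
--             return d_start + (n - s_start), (s_start + num) - n
--     gaps = [s_start - n for _, s_start, _ in map if n < s_start]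
--     return (n, min(gaps)) if gaps else (n, -1)
-- ===== Notes on version B (the rewrite author's own statement) =====
-- stated objective: simpler
-- what changed: Replaces A's single interleaved loop with a mutable running-minimum sentinel by two separate passes: one scan for the first containing range, then a comprehension of gaps reduced with min (empty list instead of a 1e12 sentinel).
import Mathlib
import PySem

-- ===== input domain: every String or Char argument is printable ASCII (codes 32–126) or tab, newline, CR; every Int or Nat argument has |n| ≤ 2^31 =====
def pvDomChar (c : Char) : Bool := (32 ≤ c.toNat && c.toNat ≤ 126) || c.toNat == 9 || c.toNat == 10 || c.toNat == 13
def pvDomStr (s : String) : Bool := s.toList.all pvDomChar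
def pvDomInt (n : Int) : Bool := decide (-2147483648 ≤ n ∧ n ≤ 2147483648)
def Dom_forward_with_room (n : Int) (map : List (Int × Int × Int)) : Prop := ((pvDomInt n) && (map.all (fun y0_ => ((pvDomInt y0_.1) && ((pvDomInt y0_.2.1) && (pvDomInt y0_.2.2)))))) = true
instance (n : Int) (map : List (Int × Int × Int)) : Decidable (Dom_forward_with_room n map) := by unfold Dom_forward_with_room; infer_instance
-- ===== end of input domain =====

-- B separates A's interleaved loop (running-minimum sentinel) into two passes: find the
-- containing range, else reduce the list of gaps with min; simpler, same cost, same values.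

-- ===== PORT A =====
-- A's single loop, carrying the running `room` accumulator; the sentinel check follows the loop.
def fwrGo (n : Int) : List (Int × Int × Int) → Int → Int × Int
  | [], room => (n, if room = 1000000000000 then -1 else room)
  | (d, s, num) :: rest, room =>
      let room' := if n < s then min room (s - n) else room
      if s ≤ n ∧ n < s + num then (d + (n - s), (s + num) - n)
      else fwrGo n rest room'

def forward_with_room (n : Int) (map : List (Int × Int × Int)) : Int × Int :=
  fwrGo n map 1000000000000

-- ===== PORT B =====
-- first pass: first containing range
def fwrFind? (n : Int) : List (Int × Int × Int) → Option (Int × Int)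
  | [] => none
  | (d, s, num) :: rest =>
      if s ≤ n ∧ n < s + num then some (d + (n - s), (s + num) - n) else fwrFind? n rest

-- second pass: the gap comprehension
def fwrGaps (n : Int) (map : List (Int × Int × Int)) : List Int :=
  (map.filter (fun t => decide (n < t.2.1))).map (fun t => t.2.1 - n)

def forward_with_room_alt (n : Int) (map : List (Int × Int × Int)) : Int × Int :=
  match fwrFind? n map with
  | some r => r
  | none =>
      match fwrGaps n map with
      | [] => (n, -1)
      | g :: gs => (n, gs.foldl min g)   -- min(gaps) over the nonempty list

-- ===== PRECONDITION & SPEC =====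
def Spec_forward_with_room (n : Int) (map : List (Int × Int × Int)) (out : Int × Int) : Prop := out = forward_with_room_alt n map
instance (n : Int) (map : List (Int × Int × Int)) (out : Int × Int) : Decidable (Spec_forward_with_room n map out) := by unfold Spec_forward_with_room; infer_instance

-- ===== CLAIM (what is proved, stated in full; the proofs are below) =====
def Claim_equal_forward_with_room : Prop := ∀ (n : Int) (map : List (Int × Int × Int)), Dom_forward_with_room n map → Spec_forward_with_room n map (forward_with_room n map)

-- ===== LEMMAS AND PROOFS =====

theorem fwrGo_some (n : Int) (map : List (Int × Int × Int)) (r : Int × Int)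
    (h : fwrFind? n map = some r) : ∀ room, fwrGo n map room = r := by
  induction map with
  | nil => simp [fwrFind?] at h
  | cons t rest ih =>
      obtain ⟨d, s, num⟩ := t
      intro room
      by_cases hc : s ≤ n ∧ n < s + num
      · simp [fwrFind?, hc] at h; simp [fwrGo, hc, h]
      · simp [fwrFind?, hc] at h; simp [fwrGo, hc, ih h]

theorem fwrGo_none (n : Int) (map : List (Int × Int × Int))
    (h : fwrFind? n map = none) : ∀ room, fwrGo n map room =
      (n, if (fwrGaps n map).foldl min room = 1000000000000 then -1
          else (fwrGaps n map).foldl min room) := by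
  induction map with
  | nil => intro room; simp [fwrGo, fwrGaps]
  | cons t rest ih =>
      obtain ⟨d, s, num⟩ := t
      intro room
      by_cases hc : s ≤ n ∧ n < s + num
      · simp [fwrFind?, hc] at h
      · simp [fwrFind?, hc] at h
        by_cases hlt : n < s
        · simp [fwrGo, hc, hlt, fwrGaps, ih h, List.foldl_cons]
        · simp [fwrGo, hc, hlt, fwrGaps, ih h]

theorem fwrFoldl_min_le (l : List Int) : ∀ a : Int, l.foldl min a ≤ a := by
  induction l with
  | nil => intro a; simp
  | cons x xs ih =>
      intro a
      calc (x :: xs).foldl min a = xs.foldl min (min a x) := rfl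
        _ ≤ min a x := ih _
        _ ≤ a := min_le_left _ _

theorem fwrGaps_lt (n : Int) (map : List (Int × Int × Int))
    (hdom : Dom_forward_with_room n map) :
    ∀ g ∈ fwrGaps n map, g < 1000000000000 := by
  intro g hg
  simp only [fwrGaps, List.mem_map, List.mem_filter] at hg
  obtain ⟨t, ⟨ht, _⟩, rfl⟩ := hg
  simp only [Dom_forward_with_room, pvDomInt, Bool.and_eq_true, List.all_eq_true,
    decide_eq_true_eq] at hdom
  have h1 := hdom.1
  have h2 := (hdom.2 t ht).2.1
  omega

-- ===== VERDICT (by name: the statement is the Claim_ definition above) =====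
theorem forward_with_room_spec : Claim_equal_forward_with_room := by
  intro n map hdom
  unfold Spec_forward_with_room forward_with_room forward_with_room_alt
  cases hf : fwrFind? n map with
  | some r => rw [fwrGo_some n map r hf]
  | none =>
      rw [fwrGo_none n map hf]
      cases hg : fwrGaps n map with
      | nil => simp
      | cons g gs =>
          have hglt : g < 1000000000000 := fwrGaps_lt n map hdom g (by rw [hg]; simp)
          have hmin : min (1000000000000 : Int) g = g := by omega
          have hle : gs.foldl min g ≤ g := fwrFoldl_min_le gs g
          simp only [List.foldl_cons, hmin]
          have : gs.foldl min g ≠ 1000000000000 := by omega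
          simp [this]
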